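-- pv_equiv track=rewrite | github.com/eds-global/ecm-generator | src/wwr.py | remove_window_sections
-- ===== SOURCE A (Python) =====
-- def remove_window_sections(content, start_marker, end_marker):
--     """
--     Removes all = WINDOW sections between the start_marker and end_marker.
--     """
--     start_index = None
--     end_index = None
--     for i, line in enumerate(content):
--         if start_marker in line and start_index is None:
--             start_index = i
--         if end_marker in line and start_index is not None:
--             end_index = i
--             break
--
--     if start_index is None or end_index is None:
--         # Markers not found, return content unchanged
--         return content
--
--     # Extract the content between the markers
--     pre_marker_content = content[:start_index + 1]
--     between_marker_content = content[start_index + 1:end_index]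
--     post_marker_content = content[end_index:]
--
--     # Filter out = WINDOW sections
--     filtered_content = []
--     skip_window_section = False
--
--     for line in between_marker_content:
--         if "= WINDOW" in line:
--             skip_window_section = True
--         if skip_window_section and line.strip() == "..":
--             skip_window_section = False
--             continue
--         if not skip_window_section:
--             filtered_content.append(line)
--
--     return pre_marker_content + filtered_content + post_marker_content
-- ===== SOURCE B (Python) =====
-- def _filter_windows(lines):
--     """Drop every chunk from a '= WINDOW' line through its closing '..' line (inclusive)."""
--     for k, line in enumerate(lines):
--         if "= WINDOW" in line:
--             close = next((m for m, t in enumerate(lines[k:]) if t.strip() == ".."), None)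
--             if close is None:
--                 return lines[:k]
--             return lines[:k] + _filter_windows(lines[k + close + 1:])
--     return lines
--
--
-- def remove_window_sections(content, start_marker, end_marker):
--     start_index = next((i for i, l in enumerate(content) if start_marker in l), None)
--     if start_index is None:
--         return content
--     rel = next((i for i, l in enumerate(content[start_index:]) if end_marker in l), None)
--     if rel is None:
--         return content
--     end_index = start_index + rel
--     between = content[start_index + 1:end_index]
--     return content[:start_index + 1] + _filter_windows(between) + content[end_index:]
-- ===== Notes on version B (the rewrite author's own statement) =====
-- stated objective: alternative
-- what changed: Replaces A's per-line skip-flag filter with a chunk-based decomposition: repeatedly locate the next '= WINDOW' line and its closing '..' line, splice out that whole chunk, and continue after it; marker search uses first-index lookups instead of a stateful enumerate loop.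
import Mathlib
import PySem

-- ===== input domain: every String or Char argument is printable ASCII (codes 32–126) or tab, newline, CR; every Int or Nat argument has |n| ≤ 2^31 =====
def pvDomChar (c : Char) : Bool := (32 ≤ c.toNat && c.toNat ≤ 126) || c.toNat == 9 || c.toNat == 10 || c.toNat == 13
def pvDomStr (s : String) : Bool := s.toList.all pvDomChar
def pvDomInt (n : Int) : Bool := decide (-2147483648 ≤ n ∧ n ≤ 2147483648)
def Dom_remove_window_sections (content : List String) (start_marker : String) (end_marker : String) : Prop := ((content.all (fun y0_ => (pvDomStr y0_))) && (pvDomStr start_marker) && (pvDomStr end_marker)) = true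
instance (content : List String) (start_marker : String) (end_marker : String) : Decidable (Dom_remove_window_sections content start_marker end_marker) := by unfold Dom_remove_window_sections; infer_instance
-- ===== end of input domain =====

-- B replaces A's per-line skip-flag filter by a chunk-based decomposition (find the next
-- '= WINDOW' line, find its closing '..' line, splice the chunk out, continue after it);
-- objective: alternative decomposition, same cost.

-- ===== PORT A =====
-- 'm in l' (Python substring test); shared by both ports
def pvHas (m l : String) : Bool := PySem.Str.isIn m l

-- the enumerate loop searching for the two markers; state = (i, start_index); returns (start_index, end_index)
def pvFindMarkersA (sm em : String) : List String → Nat → Option Nat → Option Nat × Option Nat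
  | [], _, s => (s, none)
  | l :: ls, i, s =>
    let s' := if pvHas sm l && s.isNone then some i else s
    if pvHas em l && s'.isSome then (s', some i)
    else pvFindMarkersA sm em ls (i + 1) s'

-- the filter loop over between_marker_content; state = (filtered_content, skip_window_section)
def pvFilterA : List String → List String → Bool → List String
  | [], acc, _ => acc
  | l :: ls, acc, skip =>
    let skip1 := if pvHas "= WINDOW" l then true else skip
    if skip1 && (PySem.Str.strip l == "..") then pvFilterA ls acc false
    else if !skip1 then pvFilterA ls (acc ++ [l]) skip1
    else pvFilterA ls acc skip1

-- slices content[:si+1], content[si+1:ei], content[ei:] have nonnegative in-range bounds with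
-- si ≤ ei, so List.take/List.drop are exact here
def remove_window_sections (content : List String) (start_marker : String) (end_marker : String) : List String :=
  match pvFindMarkersA start_marker end_marker content 0 none with
  | (some si, some ei) =>
      content.take (si + 1) ++ pvFilterA ((content.take ei).drop (si + 1)) [] false ++ content.drop ei
  | _ => content

-- ===== PORT B =====
def pvIsWin (l : String) : Bool := pvHas "= WINDOW" l
def pvIsClose (l : String) : Bool := PySem.Str.strip l == ".."

-- Source B's _filter_windows: next(...) over enumerate is List.findIdx?, slices are take/drop
def pvFiltB (lines : List String) : List String :=
  match h : lines.findIdx? pvIsWin with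
  | none => lines
  | some k =>
    match (lines.drop k).findIdx? pvIsClose with
    | none => lines.take k
    | some m => lines.take k ++ pvFiltB (lines.drop (k + m + 1))
termination_by lines.length
decreasing_by
  have hk : k < lines.length := (List.findIdx?_eq_some_iff_findIdx_eq.mp h).1
  simp [List.length_drop]; omega

def remove_window_sections_alt (content : List String) (start_marker : String) (end_marker : String) : List String :=
  match content.findIdx? (fun l => pvHas start_marker l) with
  | none => content
  | some si =>
    match (content.drop si).findIdx? (fun l => pvHas end_marker l) with
    | none => content
    | some r =>
      content.take (si + 1) ++ pvFiltB ((content.take (si + r)).drop (si + 1)) ++ content.drop (si + r)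

-- ===== PRECONDITION & SPEC =====
def Spec_remove_window_sections (content : List String) (start_marker : String) (end_marker : String) (out : List String) : Prop := out = remove_window_sections_alt content start_marker end_marker
instance (content : List String) (start_marker : String) (end_marker : String) (out : List String) : Decidable (Spec_remove_window_sections content start_marker end_marker out) := by unfold Spec_remove_window_sections; infer_instance

-- ===== CLAIM (what is proved, stated in full; the proofs are below) =====
def Claim_equal_remove_window_sections : Prop := ∀ (content : List String) (start_marker : String) (end_marker : String), Dom_remove_window_sections content start_marker end_marker → Spec_remove_window_sections content start_marker end_marker (remove_window_sections content start_marker end_marker)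

-- ===== LEMMAS AND PROOFS =====

-- what pvFilterA produces while the skip flag is set: drop to the first '..' (inclusive), resume
def pvSkipPart (ls : List String) : List String :=
  match ls.findIdx? pvIsClose with
  | none => []
  | some m => pvFiltB (ls.drop (m + 1))

theorem pvFindMarkersA_some (sm em : String) :
    ∀ (ls : List String) (i j : Nat),
      pvFindMarkersA sm em ls i (some j) =
        (some j, (ls.findIdx? (fun l => pvHas em l)).map (fun r => i + r)) := by
  intro ls
  induction ls with
  | nil => intro i j; simp [pvFindMarkersA]
  | cons l ls ih =>
    intro i j
    simp only [pvFindMarkersA, List.findIdx?_cons, Option.isNone_some, Bool.and_false,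
      Bool.false_eq_true, reduceIte, Option.isSome_some, Bool.and_true]
    by_cases he : pvHas em l = true
    · simp [he]
    · have he' : pvHas em l = false := by simpa using he
      simp only [he', Bool.false_eq_true, reduceIte]
      rw [ih]
      cases hf : ls.findIdx? (fun l => pvHas em l) <;> simp [hf] <;> omega

theorem pvFindMarkersA_none (sm em : String) :
    ∀ (ls : List String) (i : Nat),
      pvFindMarkersA sm em ls i none =
        match ls.findIdx? (fun l => pvHas sm l) with
        | none => (none, none)
        | some k => (some (i + k),
            ((ls.drop k).findIdx? (fun l => pvHas em l)).map (fun r => i + k + r)) := by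
  intro ls
  induction ls with
  | nil => intro i; simp [pvFindMarkersA]
  | cons l ls ih =>
    intro i
    by_cases hs : pvHas sm l = true
    · by_cases he : pvHas em l = true
      · simp [pvFindMarkersA, hs, he, List.findIdx?_cons]
      · have he' : pvHas em l = false := by simpa using he
        simp only [pvFindMarkersA, hs, Option.isNone_none, Bool.and_true, reduceIte,
          Option.isSome_some, he', Bool.false_eq_true, List.findIdx?_cons]
        rw [pvFindMarkersA_some]
        simp only [List.drop_zero, List.findIdx?_cons, he', Bool.false_eq_true, reduceIte]
        cases hf : ls.findIdx? (fun l => pvHas em l) <;> simp [hf] <;> omega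
    · have hs' : pvHas sm l = false := by simpa using hs
      simp only [pvFindMarkersA, hs', Bool.false_and, Bool.false_eq_true, reduceIte,
        Option.isNone_none, Option.isSome_none, Bool.and_false, Bool.and_true,
        List.findIdx?_cons]
      rw [ih]
      cases hf : ls.findIdx? (fun l => pvHas sm l) with
      | none => simp [hf]
      | some k =>
        simp only [hf, Option.map_some, List.drop_succ_cons]
        cases hg : (ls.drop k).findIdx? (fun l => pvHas em l) <;> simp [hg] <;> omega

theorem pvFiltB_eq (lines : List String) :
    pvFiltB lines =
      match lines.findIdx? pvIsWin with
      | none => lines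
      | some k =>
        match (lines.drop k).findIdx? pvIsClose with
        | none => lines.take k
        | some m => lines.take k ++ pvFiltB (lines.drop (k + m + 1)) := by
  rw [pvFiltB.eq_def]
  split
  · rename_i heq
    simp [heq]
  · rename_i k heq
    simp [heq]

theorem pvFiltB_cons_not_win {l : String} (hl : pvIsWin l = false) (ls : List String) :
    pvFiltB (l :: ls) = l :: pvFiltB ls := by
  rw [pvFiltB_eq, pvFiltB_eq]
  simp only [List.findIdx?_cons, hl, Bool.false_eq_true, reduceIte]
  cases hf : ls.findIdx? pvIsWin with
  | none => simp [hf]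
  | some k =>
    simp only [hf, Option.map_some, List.take_succ_cons, List.drop_succ_cons]
    cases hg : (ls.drop k).findIdx? pvIsClose <;> simp [hg, Nat.add_right_comm]

theorem pvFiltB_cons_win_close {l : String} (hw : pvIsWin l = true) (hc : pvIsClose l = true)
    (ls : List String) : pvFiltB (l :: ls) = pvFiltB ls := by
  rw [pvFiltB_eq]
  simp [List.findIdx?_cons, hw, hc]

theorem pvFiltB_cons_win_not_close {l : String} (hw : pvIsWin l = true) (hc : pvIsClose l = false)
    (ls : List String) : pvFiltB (l :: ls) = pvSkipPart ls := by
  rw [pvFiltB_eq, pvSkipPart]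
  simp only [List.findIdx?_cons, hw, reduceIte, List.drop_zero, hc, Bool.false_eq_true,
    List.take_zero, List.nil_append]
  cases hf : ls.findIdx? pvIsClose with
  | none => simp [hf]
  | some m => simp [hf, List.drop_succ_cons]

theorem pvFilterA_eq :
    ∀ (ls : List String),
      (∀ acc, pvFilterA ls acc false = acc ++ pvFiltB ls) ∧
      (∀ acc, pvFilterA ls acc true = acc ++ pvSkipPart ls) := by
  intro ls
  induction ls with
  | nil =>
    constructor <;> intro acc <;>
      simp [pvFilterA, pvFiltB_eq, pvSkipPart, List.findIdx?_nil]
  | cons l ls ih =>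
    have hwin : pvHas "= WINDOW" l = pvIsWin l := rfl
    have hclo : (PySem.Str.strip l == "..") = pvIsClose l := rfl
    constructor
    · intro acc
      by_cases hw : pvIsWin l = true
      · by_cases hc : pvIsClose l = true
        · simp only [pvFilterA, hwin, hclo, hw, hc, reduceIte, Bool.and_self]
          rw [(ih).1, pvFiltB_cons_win_close hw hc]
        · have hc' : pvIsClose l = false := by simpa using hc
          simp only [pvFilterA, hwin, hclo, hw, hc', reduceIte, Bool.true_and,
            Bool.false_eq_true, Bool.not_true]
          rw [(ih).2, pvFiltB_cons_win_not_close hw hc']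
      · have hw' : pvIsWin l = false := by simpa using hw
        simp only [pvFilterA, hwin, hclo, hw', Bool.false_eq_true, reduceIte,
          Bool.false_and, Bool.not_false]
        rw [(ih).1, pvFiltB_cons_not_win hw']
        simp
    · intro acc
      have h1 : (if pvIsWin l = true then true else true) = true := by split <;> rfl
      by_cases hc : pvIsClose l = true
      · simp only [pvFilterA, hwin, hclo, h1, hc, Bool.and_self, reduceIte]
        rw [(ih).1, pvSkipPart]
        simp [List.findIdx?_cons, hc]
      · have hc' : pvIsClose l = false := by simpa using hc
        simp only [pvFilterA, hwin, hclo, h1, hc', Bool.true_and, Bool.false_eq_true,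
          reduceIte, Bool.not_true]
        rw [(ih).2, pvSkipPart, pvSkipPart]
        simp only [List.findIdx?_cons, hc', Bool.false_eq_true, reduceIte]
        cases hf : ls.findIdx? pvIsClose with
        | none => simp [hf]
        | some m => simp [hf, List.drop_succ_cons]

-- ===== VERDICT (by name: the statement is the Claim_ definition above) =====
theorem remove_window_sections_spec : Claim_equal_remove_window_sections := by
  intro content sm em _
  unfold Spec_remove_window_sections remove_window_sections remove_window_sections_alt
  rw [pvFindMarkersA_none]
  cases hs : content.findIdx? (fun l => pvHas sm l) with
  | none => simp
  | some si =>
    cases he : (content.drop si).findIdx? (fun l => pvHas em l) with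
    | none => simp [he]
    | some r =>
      simp only [he, Option.map_some, Nat.zero_add]
      rw [(pvFilterA_eq ((content.take (si + r)).drop (si + 1))).1]
      simp
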